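-- pv_equiv track=rewrite | github.com/RebelCoding84/pqc-lab | src/capacity/verify_providers.py | _pick_preferred_mldsa
-- ===== SOURCE A (Python) =====
-- PREFERRED_MLDSA_ALGORITHMS = ("ML-DSA-65", "ML-DSA-44", "ML-DSA-87")
--
-- def _normalize_algorithm_name(name: str) -> str:
--     return "".join(ch for ch in name.lower() if ch.isalnum())
--
-- def _mldsa_candidates(algorithms: list[str]) -> list[str]:
--     return [alg for alg in algorithms if _normalize_algorithm_name(alg).startswith("mldsa")]
--
-- def _pick_preferred_mldsa(algorithms: list[str]) -> str | None:
--     for preferred in PREFERRED_MLDSA_ALGORITHMS: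
--         for algorithm in algorithms:
--             if _normalize_algorithm_name(algorithm) == _normalize_algorithm_name(preferred):
--                 return algorithm
--     mldsa_options = sorted(_mldsa_candidates(algorithms))
--     if mldsa_options:
--         return mldsa_options[0]
--     return None
-- ===== SOURCE B (Python) =====
-- PREFERRED_MLDSA_ALGORITHMS = ("ML-DSA-65", "ML-DSA-44", "ML-DSA-87")
--
-- def _normalize_algorithm_name(name: str) -> str:
--     return "".join(ch for ch in name.lower() if ch.isalnum())
--
-- _PREFERRED_NORMS = [_normalize_algorithm_name(p) for p in PREFERRED_MLDSA_ALGORITHMS]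
--
-- def _key(pos, alg):
--     # Composite sort key: preferred algorithms order by (preference rank, first position),
--     # other ML-DSA candidates come after, ordered by the string itself.
--     norm = _normalize_algorithm_name(alg)
--     if norm in _PREFERRED_NORMS:
--         return (_PREFERRED_NORMS.index(norm), pos, "")
--     if norm.startswith("mldsa"):
--         return (len(_PREFERRED_NORMS), 0, alg)
--     return None
--
-- def _pick_preferred_mldsa(algorithms):
--     # Single pass: keep the element with the minimal composite key (strict '<' keeps
--     # the earliest on ties). No nested rescans, no sort.
--     best = None  # (key, alg)
--     for pos, alg in enumerate(algorithms):
--         k = _key(pos, alg)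
--         if k is not None and (best is None or k < best[0]):
--             best = (k, alg)
--     return best[1] if best is not None else None
-- ===== Notes on version B (the rewrite author's own statement) =====
-- stated objective: alternative
-- what changed: Replaces A's nested preference-by-algorithm rescans plus sorted-fallback with a single pass that selects the minimum under a composite key (preference rank, first position, string), so no inner loop and no sort remain.
import Mathlib
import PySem

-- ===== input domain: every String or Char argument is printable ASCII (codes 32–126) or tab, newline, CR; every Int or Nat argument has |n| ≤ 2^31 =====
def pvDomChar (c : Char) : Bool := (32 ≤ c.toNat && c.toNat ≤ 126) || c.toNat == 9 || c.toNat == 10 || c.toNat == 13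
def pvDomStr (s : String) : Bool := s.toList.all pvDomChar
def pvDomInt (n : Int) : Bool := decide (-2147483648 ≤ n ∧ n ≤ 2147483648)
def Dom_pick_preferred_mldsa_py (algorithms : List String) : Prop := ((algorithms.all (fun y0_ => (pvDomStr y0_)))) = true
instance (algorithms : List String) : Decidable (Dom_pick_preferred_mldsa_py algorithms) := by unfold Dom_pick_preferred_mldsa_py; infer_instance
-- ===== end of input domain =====

-- B (alternative): a single pass selecting the minimum under a composite key
-- (preference rank, first position, string) replaces A's nested rescans and its sort.

-- ===== PORT A =====
def pvNorm (name : String) : List Char :=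
  (PySem.Chars.lower name.toList).filter (fun ch => PySem.Chars.isalnum ch)

def pvPreferred : List String := ["ML-DSA-65", "ML-DSA-44", "ML-DSA-87"]

def pick_preferred_mldsa_py (algorithms : List String) : Option String :=
  match pvPreferred.findSome? (fun preferred =>
      algorithms.find? (fun algorithm => pvNorm algorithm == pvNorm preferred)) with
  | some algorithm => some algorithm
  | none =>
    let mldsa_options :=
      PySem.List.sorted
        (algorithms.filter (fun alg => PySem.Chars.startswith (pvNorm alg) "mldsa".toList))
        (fun x => x) false
    match mldsa_options with
    | m :: _ => some m
    | [] => none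

-- ===== PORT B =====
abbrev PvK := Nat × Int × String

-- Python's tuple comparison of the (int, int, str) keys, ported by hand: exact
-- lexicographic order (third components are compared by codepoint-lexicographic '<').
def pvTupLt (a b : PvK) : Bool :=
  decide (a.1 < b.1 ∨ (a.1 = b.1 ∧ (a.2.1 < b.2.1 ∨ (a.2.1 = b.2.1 ∧ a.2.2 < b.2.2))))

def pvPrefNorms : List (List Char) := pvPreferred.map pvNorm

def pvKeyOf (pos : Int) (alg : String) : Option PvK :=
  let norm := pvNorm alg
  match PySem.List.index? pvPrefNorms norm with
  | some r => some (r, pos, "")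
  | none =>
    if PySem.Chars.startswith norm "mldsa".toList then
      some (3, 0, alg)
    else none

def pvBestStep (best : Option (PvK × String)) (pa : Int × String) : Option (PvK × String) :=
  match pvKeyOf pa.1 pa.2 with
  | none => best
  | some k =>
    match best with
    | none => some (k, pa.2)
    | some (bk, _) => if pvTupLt k bk then some (k, pa.2) else best

def pick_preferred_mldsa_py_alt (algorithms : List String) : Option String :=
  ((PySem.List.enumerate algorithms 0).foldl pvBestStep none).map (·.2)

-- ===== PRECONDITION & SPEC =====
def Spec_pick_preferred_mldsa_py (algorithms : List String) (out : Option String) : Prop := out = pick_preferred_mldsa_py_alt algorithms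
instance (algorithms : List String) (out : Option String) : Decidable (Spec_pick_preferred_mldsa_py algorithms out) := by unfold Spec_pick_preferred_mldsa_py; infer_instance

-- ===== CLAIM (what is proved, stated in full; the proofs are below) =====
def Claim_equal_pick_preferred_mldsa_py : Prop := ∀ (algorithms : List String), Dom_pick_preferred_mldsa_py algorithms → Spec_pick_preferred_mldsa_py algorithms (pick_preferred_mldsa_py algorithms)

-- ===== LEMMAS AND PROOFS =====

-- Left-biased minimum of two optional keyed entries (what one step of B's loop computes).
def pvMinOpt (x y : Option (PvK × String)) : Option (PvK × String) :=
  match x, y with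
  | none, y => y
  | x, none => x
  | some (k1, a1), some (k2, a2) => if pvTupLt k2 k1 then some (k2, a2) else some (k1, a1)

theorem pvMinOpt_none_left (y : Option (PvK × String)) : pvMinOpt none y = y := by
  cases y <;> rfl

theorem pvMinOpt_none_right (x : Option (PvK × String)) : pvMinOpt x none = x := by
  cases x <;> rfl

theorem pvMinOpt_some (k1 k2 : PvK) (a1 a2 : String) :
    pvMinOpt (some (k1, a1)) (some (k2, a2))
      = if pvTupLt k2 k1 then some (k2, a2) else some (k1, a1) := rfl

theorem pvTupLt_trans {a b c : PvK} (h1 : pvTupLt a b = true) (h2 : pvTupLt b c = true) :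
    pvTupLt a c = true := by
  rcases a with ⟨r1, p1, s1⟩; rcases b with ⟨r2, p2, s2⟩; rcases c with ⟨r3, p3, s3⟩
  simp only [pvTupLt, decide_eq_true_eq] at h1 h2 ⊢
  rcases h1 with h | ⟨e1, h1'⟩
  · rcases h2 with g | ⟨e2, h2'⟩ <;> [left; left] <;> omega
  · rcases h2 with g | ⟨e2, h2'⟩
    · left; omega
    · right
      refine ⟨e1.trans e2, ?_⟩
      rcases h1' with hp | ⟨ep1, hs1⟩
      · rcases h2' with gp | ⟨ep2, hs2⟩ <;> [left; left] <;> omega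
      · rcases h2' with gp | ⟨ep2, hs2⟩
        · left; omega
        · right; exact ⟨ep1.trans ep2, lt_trans hs1 hs2⟩

theorem pvTupLt_neg_trans {a b c : PvK} (h1 : ¬ pvTupLt b a = true) (h2 : ¬ pvTupLt c b = true) :
    ¬ pvTupLt c a = true := by
  rcases a with ⟨r1, p1, s1⟩; rcases b with ⟨r2, p2, s2⟩; rcases c with ⟨r3, p3, s3⟩
  simp only [pvTupLt, decide_eq_true_eq] at h1 h2 ⊢
  push Not at h1 h2
  obtain ⟨hr1, h1'⟩ := h1
  obtain ⟨hr2, h2'⟩ := h2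
  rintro (h | ⟨he, h'⟩)
  · omega
  · have e21 : r2 = r1 := by omega
    have e32 : r3 = r2 := by omega
    obtain ⟨hp1, h1''⟩ := h1' e21
    obtain ⟨hp2, h2''⟩ := h2' e32
    rcases h' with hp | ⟨hpe, hs⟩
    · omega
    · have ep21 : p2 = p1 := by omega
      have ep32 : p3 = p2 := by omega
      exact absurd hs (not_lt.mpr (le_trans (h1'' ep21) (h2'' ep32)))

theorem pvMinOpt_assoc (x y z : Option (PvK × String)) :
    pvMinOpt (pvMinOpt x y) z = pvMinOpt x (pvMinOpt y z) := by
  rcases x with _ | ⟨k1, a1⟩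
  · rw [pvMinOpt_none_left, pvMinOpt_none_left]
  rcases y with _ | ⟨k2, a2⟩
  · rw [pvMinOpt_none_right, pvMinOpt_none_left]
  rcases z with _ | ⟨k3, a3⟩
  · rw [pvMinOpt_none_right, pvMinOpt_none_right]
  rw [pvMinOpt_some]
  by_cases h21 : pvTupLt k2 k1 = true
  · rw [if_pos h21, pvMinOpt_some]
    by_cases h32 : pvTupLt k3 k2 = true
    · rw [if_pos h32, pvMinOpt_some, if_pos (pvTupLt_trans h32 h21)]
    · rw [if_neg h32, pvMinOpt_some, if_pos h21]
  · rw [if_neg h21, pvMinOpt_some, pvMinOpt_some]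
    by_cases h32 : pvTupLt k3 k2 = true
    · rw [if_pos h32, pvMinOpt_some]
    · rw [if_neg h32, if_neg (pvTupLt_neg_trans h21 h32), pvMinOpt_some, if_neg h21]

theorem pvBestStep_eq (best : Option (PvK × String)) (pa : Int × String) :
    pvBestStep best pa = pvMinOpt best ((pvKeyOf pa.1 pa.2).map (fun k => (k, pa.2))) := by
  rcases h : pvKeyOf pa.1 pa.2 with _ | k <;>
    rcases best with _ | ⟨bk, ba⟩ <;>
    simp [pvBestStep, pvMinOpt, h]

-- Right-recursive form of B's selection.
def pvBestR (xs : List String) (i : Int) : Option (PvK × String) :=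
  match xs with
  | [] => none
  | a :: t => pvMinOpt ((pvKeyOf i a).map (fun k => (k, a))) (pvBestR t (i + 1))

theorem pv_foldl_enum (xs : List String) (i : Int) (acc : Option (PvK × String)) :
    (PySem.List.enumerate xs i).foldl pvBestStep acc = pvMinOpt acc (pvBestR xs i) := by
  induction xs generalizing i acc with
  | nil =>
    show (PySem.List.enumerate ([] : List String) i).foldl pvBestStep acc = pvMinOpt acc none
    rw [PySem.List.enumerate_nil, List.foldl_nil, pvMinOpt_none_right]
  | cons a t ih =>
    rw [PySem.List.enumerate_cons, List.foldl_cons, ih, pvBestStep_eq]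
    simp only [pvBestR, pvMinOpt_assoc]

-- First match with its absolute position.
def pvLoc (p : String → Bool) (xs : List String) (i : Int) : Option (Int × String) :=
  match xs with
  | [] => none
  | a :: t => if p a then some (i, a) else pvLoc p t (i + 1)

theorem pvLoc_map_snd (p : String → Bool) (xs : List String) (i : Int) :
    (pvLoc p xs i).map (·.2) = xs.find? p := by
  induction xs generalizing i with
  | nil => rfl
  | cons a t ih =>
    by_cases h : p a <;> simp [pvLoc, List.find?, h, ih]

theorem pvLoc_ge (p : String → Bool) (xs : List String) (i j : Int) (b : String)
    (h : pvLoc p xs i = some (j, b)) : i ≤ j := by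
  induction xs generalizing i with
  | nil => simp [pvLoc] at h
  | cons a t ih =>
    by_cases ha : p a
    · simp [pvLoc, ha] at h
      omega
    · simp only [pvLoc, ha, if_neg, Bool.false_eq_true, not_false_eq_true] at h
      have := ih (i + 1) h
      omega

-- First minimum of a list of strings (the value Python's sorted(...)[0] yields).
def pvMin (xs : List String) : Option String :=
  match xs with
  | [] => none
  | a :: t => some (match pvMin t with | none => a | some m => if m < a then m else a)

theorem pvMin_mem (xs : List String) (m : String) (h : pvMin xs = some m) : m ∈ xs := by
  induction xs generalizing m with
  | nil => simp [pvMin] at h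
  | cons a t ih =>
    rcases ht : pvMin t with _ | m'
    · simp [pvMin, ht] at h; simp [h]
    · simp only [pvMin, ht, Option.some.injEq] at h
      by_cases hlt : m' < a
      · simp only [if_pos hlt] at h
        exact List.mem_cons_of_mem _ (h ▸ ih m' ht)
      · simp only [if_neg hlt] at h
        simp [h]

theorem pvMin_le (xs : List String) (m : String) (h : pvMin xs = some m) :
    ∀ y ∈ xs, m ≤ y := by
  induction xs generalizing m with
  | nil => simp
  | cons a t ih =>
    intro y hy
    rcases ht : pvMin t with _ | m'
    · simp only [pvMin, ht, Option.some.injEq] at h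
      have : t = [] := by
        cases t with
        | nil => rfl
        | cons b u => simp [pvMin] at ht
      subst this
      simp at hy
      simp [hy, ← h]
    · simp only [pvMin, ht, Option.some.injEq] at h
      rcases List.mem_cons.mp hy with rfl | hyt
      · by_cases hlt : m' < y
        · simp only [if_pos hlt] at h; rw [← h]; exact le_of_lt hlt
        · simp only [if_neg hlt] at h; rw [← h]
      · have hm' := ih m' ht y hyt
        by_cases hlt : m' < a
        · simp only [if_pos hlt] at h; rw [← h]; exact hm'
        · simp only [if_neg hlt] at h; rw [← h]
          exact le_trans (le_of_not_gt (by simpa using hlt)) hm'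

theorem pvMin_eq_sorted_head (xs : List String) :
    (PySem.List.sorted xs (fun x => x) false).head? = pvMin xs := by
  rcases hs : PySem.List.sorted xs (fun x => x) false with _ | ⟨m, t⟩
  · have : xs = [] := (PySem.List.sorted_eq_nil_iff _ _ _).mp hs
    subst this; rfl
  · have hmem : m ∈ xs := by
      have : m ∈ PySem.List.sorted xs (fun x => x) false := by rw [hs]; exact List.mem_cons_self
      exact (PySem.List.mem_sorted _ _ _ _).mp this
    have hle : ∀ y ∈ xs, m ≤ y := PySem.List.key_head_sorted_le _ _ hs
    have hne : xs ≠ [] := by rintro rfl; simp at hmem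
    rcases hm : pvMin xs with _ | m'
    · cases xs with
      | nil => exact absurd rfl hne
      | cons a u => simp [pvMin] at hm
    · have h1 : m ≤ m' := hle m' (pvMin_mem xs m' hm)
      have h2 : m' ≤ m := pvMin_le xs m' hm m hmem
      simp [le_antisymm h1 h2]

-- The candidate predicates of A.
def pvP (n : List Char) (a : String) : Bool := pvNorm a == n

def pvCand (a : String) : Bool := PySem.Chars.startswith (pvNorm a) "mldsa".toList

-- Explicit characterisation of B's selection: the best preferred rank with its first
-- position, else the minimal ML-DSA candidate.
def pvExpect (xs : List String) (i : Int) : Option (PvK × String) :=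
  match pvLoc (pvP (pvNorm "ML-DSA-65")) xs i with
  | some (j, a) => some ((0, j, ""), a)
  | none =>
    match pvLoc (pvP (pvNorm "ML-DSA-44")) xs i with
    | some (j, a) => some ((1, j, ""), a)
    | none =>
      match pvLoc (pvP (pvNorm "ML-DSA-87")) xs i with
      | some (j, a) => some ((2, j, ""), a)
      | none =>
        match pvMin (xs.filter pvCand) with
        | some m => some ((3, 0, m), m)
        | none => none

theorem pvk_lt_iff (r1 r2 : Nat) (p1 p2 : Int) (s1 s2 : String) :
    (pvTupLt (r1, p1, s1) (r2, p2, s2) = true) ↔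
      r1 < r2 ∨ (r1 = r2 ∧ (p1 < p2 ∨ (p1 = p2 ∧ s1 < s2))) := by
  simp [pvTupLt]

theorem pvBestR_eq_expect (xs : List String) (i : Int) : pvBestR xs i = pvExpect xs i := by
  induction xs generalizing i with
  | nil => rfl
  | cons a t ih =>
    rw [pvBestR, ih]
    by_cases e0 : pvNorm a = pvNorm "ML-DSA-65"
    · -- rank 0
      have hi : PySem.List.index? pvPrefNorms (pvNorm "ML-DSA-65") = some 0 := by decide
      have hk : pvKeyOf i a = some ((0, i, "")) := by
        simp only [pvKeyOf, e0, hi]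
      have hx : pvExpect (a :: t) i = some ((0, i, ""), a) := by
        simp [pvExpect, pvLoc, pvP, e0]
      rw [hk, hx]
      unfold pvExpect
      rcases h0 : pvLoc (pvP (pvNorm "ML-DSA-65")) t (i + 1) with _ | ⟨j, b⟩
      · rcases h1 : pvLoc (pvP (pvNorm "ML-DSA-44")) t (i + 1) with _ | ⟨j, b⟩
        · rcases h2 : pvLoc (pvP (pvNorm "ML-DSA-87")) t (i + 1) with _ | ⟨j, b⟩
          · rcases hm : pvMin (t.filter pvCand) with _ | m
            · rfl
            · simp only [Option.map_some, pvMinOpt, pvk_lt_iff]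
              rw [if_neg (by omega)]
          · have := pvLoc_ge _ _ _ _ _ h2
            simp only [Option.map_some, pvMinOpt, pvk_lt_iff]
            rw [if_neg (by omega)]
        · have := pvLoc_ge _ _ _ _ _ h1
          simp only [Option.map_some, pvMinOpt, pvk_lt_iff]
          rw [if_neg (by omega)]
      · have := pvLoc_ge _ _ _ _ _ h0
        simp only [Option.map_some, pvMinOpt, pvk_lt_iff]
        rw [if_neg (by omega)]
    · by_cases e1 : pvNorm a = pvNorm "ML-DSA-44"
      · -- rank 1
        have hi : PySem.List.index? pvPrefNorms (pvNorm "ML-DSA-44") = some 1 := by decide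
        have hk : pvKeyOf i a = some ((1, i, "")) := by
          simp only [pvKeyOf, e1, hi]
        have hL0 : pvLoc (pvP (pvNorm "ML-DSA-65")) (a :: t) i
            = pvLoc (pvP (pvNorm "ML-DSA-65")) t (i + 1) := by
          simp [pvLoc, pvP, e0]
        rw [hk]
        unfold pvExpect
        rw [hL0]
        rcases h0 : pvLoc (pvP (pvNorm "ML-DSA-65")) t (i + 1) with _ | ⟨j, b⟩
        · have hL1 : pvLoc (pvP (pvNorm "ML-DSA-44")) (a :: t) i = some (i, a) := by
            simp [pvLoc, pvP, e1]
          rw [hL1]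
          rcases h1 : pvLoc (pvP (pvNorm "ML-DSA-44")) t (i + 1) with _ | ⟨j, b⟩
          · rcases h2 : pvLoc (pvP (pvNorm "ML-DSA-87")) t (i + 1) with _ | ⟨j, b⟩
            · rcases hm : pvMin (t.filter pvCand) with _ | m
              · rfl
              · simp only [Option.map_some, pvMinOpt, pvk_lt_iff]
                rw [if_neg (by omega)]
            · have := pvLoc_ge _ _ _ _ _ h2
              simp only [Option.map_some, pvMinOpt, pvk_lt_iff]
              rw [if_neg (by omega)]
          · have := pvLoc_ge _ _ _ _ _ h1
            simp only [Option.map_some, pvMinOpt, pvk_lt_iff]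
            rw [if_neg (by omega)]
        · simp only [Option.map_some, pvMinOpt, pvk_lt_iff]
          rw [if_pos (by omega)]
      · by_cases e2 : pvNorm a = pvNorm "ML-DSA-87"
        · -- rank 2
          have hi : PySem.List.index? pvPrefNorms (pvNorm "ML-DSA-87") = some 2 := by decide
          have hk : pvKeyOf i a = some ((2, i, "")) := by
            simp only [pvKeyOf, e2, hi]
          have hL0 : pvLoc (pvP (pvNorm "ML-DSA-65")) (a :: t) i
              = pvLoc (pvP (pvNorm "ML-DSA-65")) t (i + 1) := by
            simp [pvLoc, pvP, e0]
          have hL1 : pvLoc (pvP (pvNorm "ML-DSA-44")) (a :: t) i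
              = pvLoc (pvP (pvNorm "ML-DSA-44")) t (i + 1) := by
            simp [pvLoc, pvP, e1]
          rw [hk]
          unfold pvExpect
          rw [hL0, hL1]
          rcases h0 : pvLoc (pvP (pvNorm "ML-DSA-65")) t (i + 1) with _ | ⟨j, b⟩
          · rcases h1 : pvLoc (pvP (pvNorm "ML-DSA-44")) t (i + 1) with _ | ⟨j, b⟩
            · have hL2 : pvLoc (pvP (pvNorm "ML-DSA-87")) (a :: t) i = some (i, a) := by
                simp [pvLoc, pvP, e2]
              rw [hL2]
              rcases h2 : pvLoc (pvP (pvNorm "ML-DSA-87")) t (i + 1) with _ | ⟨j, b⟩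
              · rcases hm : pvMin (t.filter pvCand) with _ | m
                · rfl
                · simp only [Option.map_some, pvMinOpt, pvk_lt_iff]
                  rw [if_neg (by omega)]
              · have := pvLoc_ge _ _ _ _ _ h2
                simp only [Option.map_some, pvMinOpt, pvk_lt_iff]
                rw [if_neg (by omega)]
            · simp only [Option.map_some, pvMinOpt, pvk_lt_iff]
              rw [if_pos (by omega)]
          · simp only [Option.map_some, pvMinOpt, pvk_lt_iff]
            rw [if_pos (by omega)]
        · -- no preferred rank
          have hidx : PySem.List.index? pvPrefNorms (pvNorm a) = none := by
            rw [PySem.List.index?_eq_none_iff]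
            simp [pvPrefNorms, pvPreferred]
            exact ⟨e0, e1, e2⟩
          have hL0 : pvLoc (pvP (pvNorm "ML-DSA-65")) (a :: t) i
              = pvLoc (pvP (pvNorm "ML-DSA-65")) t (i + 1) := by
            simp [pvLoc, pvP, e0]
          have hL1 : pvLoc (pvP (pvNorm "ML-DSA-44")) (a :: t) i
              = pvLoc (pvP (pvNorm "ML-DSA-44")) t (i + 1) := by
            simp [pvLoc, pvP, e1]
          have hL2 : pvLoc (pvP (pvNorm "ML-DSA-87")) (a :: t) i
              = pvLoc (pvP (pvNorm "ML-DSA-87")) t (i + 1) := by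
            simp [pvLoc, pvP, e2]
          by_cases c3 : pvCand a
          · -- fallback candidate
            have c3' : PySem.Chars.startswith (pvNorm a) "mldsa".toList = true := by
              simpa [pvCand] using c3
            have hk : pvKeyOf i a = some ((3, 0, a)) := by
              simp only [pvKeyOf, hidx, c3', if_true]
            rw [hk]
            unfold pvExpect
            rw [hL0, hL1, hL2]
            rcases h0 : pvLoc (pvP (pvNorm "ML-DSA-65")) t (i + 1) with _ | ⟨j, b⟩
            · rcases h1 : pvLoc (pvP (pvNorm "ML-DSA-44")) t (i + 1) with _ | ⟨j, b⟩
              · rcases h2 : pvLoc (pvP (pvNorm "ML-DSA-87")) t (i + 1) with _ | ⟨j, b⟩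
                · have hf : (a :: t).filter pvCand = a :: t.filter pvCand := by
                    simp [c3]
                  rw [hf]
                  rcases hm : pvMin (t.filter pvCand) with _ | m
                  · simp [pvMin, hm, pvMinOpt]
                  · simp only [pvMin, hm, Option.map_some, pvMinOpt, pvk_lt_iff]
                    by_cases hlt : m < a
                    · rw [if_pos (by simp [hlt])]
                      simp [hlt]
                    · rw [if_neg (by simp [hlt])]
                      simp [hlt]
                · simp only [Option.map_some, pvMinOpt, pvk_lt_iff]
                  rw [if_pos (by omega)]
              · simp only [Option.map_some, pvMinOpt, pvk_lt_iff]
                rw [if_pos (by omega)]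
            · simp only [Option.map_some, pvMinOpt, pvk_lt_iff]
              rw [if_pos (by omega)]
          · -- irrelevant element
            have c3' : PySem.Chars.startswith (pvNorm a) "mldsa".toList = false := by
              simpa [pvCand] using c3
            have hk : pvKeyOf i a = none := by
              simp only [pvKeyOf, hidx, c3', Bool.false_eq_true, if_false]
            have hf : (a :: t).filter pvCand = t.filter pvCand := by
              simp [c3]
            rw [hk]
            unfold pvExpect
            rw [hL0, hL1, hL2, hf]
            simp [pvMinOpt_none_left]

theorem pv_A_eq_expect (xs : List String) :
    pick_preferred_mldsa_py xs = (pvExpect xs 0).map (·.2) := by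
  have hfe : List.filter pvCand xs
      = List.filter (fun alg => PySem.Chars.startswith (pvNorm alg) "mldsa".toList) xs := rfl
  have f0 : xs.find? (fun algorithm => pvNorm algorithm == pvNorm "ML-DSA-65")
      = (pvLoc (pvP (pvNorm "ML-DSA-65")) xs 0).map (·.2) := (pvLoc_map_snd _ _ _).symm
  have f1 : xs.find? (fun algorithm => pvNorm algorithm == pvNorm "ML-DSA-44")
      = (pvLoc (pvP (pvNorm "ML-DSA-44")) xs 0).map (·.2) := (pvLoc_map_snd _ _ _).symm
  have f2 : xs.find? (fun algorithm => pvNorm algorithm == pvNorm "ML-DSA-87")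
      = (pvLoc (pvP (pvNorm "ML-DSA-87")) xs 0).map (·.2) := (pvLoc_map_snd _ _ _).symm
  unfold pick_preferred_mldsa_py pvExpect
  simp only [pvPreferred, List.findSome?]
  rw [f0, f1, f2, hfe]
  rcases h0 : pvLoc (pvP (pvNorm "ML-DSA-65")) xs 0 with _ | ⟨j0, b0⟩
  · rcases h1 : pvLoc (pvP (pvNorm "ML-DSA-44")) xs 0 with _ | ⟨j1, b1⟩
    · rcases h2 : pvLoc (pvP (pvNorm "ML-DSA-87")) xs 0 with _ | ⟨j2, b2⟩
      · have hsorted := pvMin_eq_sorted_head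
          (List.filter (fun alg => PySem.Chars.startswith (pvNorm alg) "mldsa".toList) xs)
        rcases hm : pvMin
            (List.filter (fun alg => PySem.Chars.startswith (pvNorm alg) "mldsa".toList) xs)
            with _ | m
        · rw [hm] at hsorted
          rcases hs : PySem.List.sorted
              (List.filter (fun alg => PySem.Chars.startswith (pvNorm alg) "mldsa".toList) xs)
              (fun x => x) false with _ | ⟨m', u⟩
          · simp
          · rw [hs] at hsorted; simp at hsorted
        · rw [hm] at hsorted
          rcases hs : PySem.List.sorted
              (List.filter (fun alg => PySem.Chars.startswith (pvNorm alg) "mldsa".toList) xs)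
              (fun x => x) false with _ | ⟨m', u⟩
          · rw [hs] at hsorted; simp at hsorted
          · rw [hs] at hsorted
            simp at hsorted
            simp [hsorted]
      · simp
    · simp
  · simp

-- ===== VERDICT (by name: the statement is the Claim_ definition above) =====
theorem pick_preferred_mldsa_py_spec : Claim_equal_pick_preferred_mldsa_py := by
  intro algorithms _
  unfold Spec_pick_preferred_mldsa_py pick_preferred_mldsa_py_alt
  rw [pv_foldl_enum, pvMinOpt_none_left, pvBestR_eq_expect, ← pv_A_eq_expect]
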